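-- pv_equiv track=rewrite | github.com/mahfuzHasan2003/CodeForces-Problems-Solution | I love AAAB.py | check_good_str
-- ===== SOURCE A (Python) =====
-- def check_good_str(inp_str) :
--     count_a = 0
--     count_b = 0
--     for i in range(len(inp_str)) :
--         if inp_str[i] == "A" :
--             count_a+=1
--         else :
--             count_b+=1
--         if count_b > count_a :
--             return "NO"
--     if inp_str[0] == "B" or inp_str[-1] == "A" :
--         return "NO"
--     else :
--         return "YES"
-- ===== SOURCE B (Python) =====
-- def check_good_str(inp_str):
--     # bracket-matcher reduction: 'A' opens; any other char cancels a top 'A',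
--     # otherwise it gets stuck on the stack. A stuck non-'A' char means some
--     # prefix had more closers than openers.
--     stack = []
--     for c in inp_str:
--         if stack and stack[-1] == "A" and c != "A":
--             stack.pop()
--         else:
--             stack.append(c)
--     if any(c != "A" for c in stack):
--         return "NO"
--     if inp_str[0] == "B" or inp_str[-1] == "A":
--         return "NO"
--     return "YES"
-- ===== Notes on version B (the rewrite author's own statement) =====
-- stated objective: alternative
-- what changed: B replaces A's incremental A/B counters with early return by a bracket-matcher reduction stack ('A' opens, any other char pops a matching top 'A' or gets stuck), declaring NO iff a non-'A' char remains stuck, then the literal endpoint check.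
import Mathlib
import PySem

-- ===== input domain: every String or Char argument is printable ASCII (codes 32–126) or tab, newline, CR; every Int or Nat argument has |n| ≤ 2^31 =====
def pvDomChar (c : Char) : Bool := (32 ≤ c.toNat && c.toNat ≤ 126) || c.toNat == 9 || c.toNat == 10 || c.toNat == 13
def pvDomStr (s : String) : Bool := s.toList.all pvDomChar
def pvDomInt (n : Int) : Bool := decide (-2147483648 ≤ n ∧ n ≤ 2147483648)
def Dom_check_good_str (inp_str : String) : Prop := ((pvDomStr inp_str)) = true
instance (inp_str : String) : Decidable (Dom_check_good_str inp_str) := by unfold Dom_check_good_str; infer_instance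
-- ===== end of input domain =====

-- B replaces A's early-exiting counter loop by a bracket-matcher reduction stack
-- ('A' opens, any other char pops a top 'A' or gets stuck); objective: alternative, same cost.

-- ===== PORT A =====
-- A's loop over range(len(inp_str)) with the two counters and the early return "NO"
def checkLoopA : List Char → Int → Int → Option String
  | [], _, _ => none
  | c :: rest, ca, cb =>
    let ca' := if c = 'A' then ca + 1 else ca
    let cb' := if c = 'A' then cb else cb + 1
    if cb' > ca' then some "NO" else checkLoopA rest ca' cb'

def check_good_str (inp_str : String) : String :=
  match checkLoopA inp_str.toList 0 0 with
  | some s => s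
  | none =>
    -- inp_str[0] / inp_str[-1]; Pre_ guarantees inp_str ≠ "" so neither raises
    if PySem.List.pyGet? inp_str.toList 0 = some 'B'
        ∨ PySem.List.pyGet? inp_str.toList (-1) = some 'A' then "NO" else "YES"

-- ===== PORT B =====
-- the reduction stack: pop a top 'A' against a non-'A' char, otherwise push
def reduceStack : List Char → List Char → List Char
  | [], st => st
  | c :: rest, st =>
    match st with
    | [] => reduceStack rest [c]
    | t :: st' =>
      if t = 'A' ∧ c ≠ 'A' then reduceStack rest st'
      else reduceStack rest (c :: t :: st')

def check_good_str_alt (inp_str : String) : String :=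
  let st := reduceStack inp_str.toList []
  if st.any (fun c => decide (c ≠ 'A')) then "NO"
  else if PySem.List.pyGet? inp_str.toList 0 = some 'B'
        ∨ PySem.List.pyGet? inp_str.toList (-1) = some 'A' then "NO" else "YES"

-- ===== PRECONDITION & SPEC =====
-- Pre_ excludes only the empty string, on which A (and B) raise IndexError at inp_str[0]
def Pre_check_good_str (inp_str : String) : Prop := inp_str ≠ ""
instance (inp_str : String) : Decidable (Pre_check_good_str inp_str) := by unfold Pre_check_good_str; infer_instance
def pvWitness_check_good_str : String := "AAB"

def Spec_check_good_str (inp_str : String) (out : String) : Prop := out = check_good_str_alt inp_str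
instance (inp_str : String) (out : String) : Decidable (Spec_check_good_str inp_str out) := by unfold Spec_check_good_str; infer_instance

-- ===== CLAIM (what is proved, stated in full; the proofs are below) =====
def Claim_equal_check_good_str : Prop := ∀ (inp_str : String), Dom_check_good_str inp_str → Pre_check_good_str inp_str → Spec_check_good_str inp_str (check_good_str inp_str)

-- ===== LEMMAS AND PROOFS =====

-- a non-'A' char is never popped: pops remove only a top 'A'
theorem nonA_persists (l : List Char) : ∀ (st : List Char),
    st.any (fun c => decide (c ≠ 'A')) = true →
    (reduceStack l st).any (fun c => decide (c ≠ 'A')) = true := by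
  induction l with
  | nil => intro st h; simpa [reduceStack] using h
  | cons c rest ih =>
    intro st h
    match st with
    | [] => simp at h
    | t :: st' =>
      simp only [reduceStack]
      split_ifs with hc
      · obtain ⟨ht, _⟩ := hc
        apply ih
        simp only [List.any_cons, ht] at h
        simpa using h
      · apply ih
        simp only [List.any_cons, Bool.or_eq_true] at h ⊢
        exact Or.inr h

-- A's counter state (ca, cb) with ca - cb = k ≥ 0 corresponds to B's stack
-- holding exactly k unmatched 'A's; A returns "NO" iff a non-'A' gets stuck.
theorem checkLoopA_eq_reduceStack (l : List Char) : ∀ (k : ℕ) (ca cb : Int), ca - cb = k →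
    checkLoopA l ca cb =
      if (reduceStack l (List.replicate k 'A')).any (fun c => decide (c ≠ 'A')) then some "NO"
      else none := by
  induction l with
  | nil => intro k ca cb _; simp [checkLoopA, reduceStack]
  | cons c rest ih =>
    intro k ca cb hk
    by_cases hc : c = 'A'
    · have hno : ¬ ((if c = 'A' then cb else cb + 1) > (if c = 'A' then ca + 1 else ca)) := by
        simp [hc]; omega
      have hstep : reduceStack (c :: rest) (List.replicate k 'A')
          = reduceStack rest (List.replicate (k + 1) 'A') := by
        cases k with
        | zero => simp [reduceStack, hc, List.replicate]
        | succ n => simp [reduceStack, hc, List.replicate]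
      rw [hstep]
      simp only [checkLoopA, if_neg hno]
      exact ih (k + 1) _ _ (by simp [hc]; omega)
    · cases k with
      | zero =>
        have hz : ca = cb := by omega
        have hyes : ((if c = 'A' then cb else cb + 1) > (if c = 'A' then ca + 1 else ca)) := by
          simp [hc]; omega
        have hstuck : (reduceStack (c :: rest) (List.replicate 0 'A')).any
            (fun c => decide (c ≠ 'A')) = true := by
          simp only [List.replicate, reduceStack]
          exact nonA_persists rest [c] (by simp [hc])
        rw [hstuck]
        simp [checkLoopA, hyes]
      | succ n =>
        have hno : ¬ ((if c = 'A' then cb else cb + 1) > (if c = 'A' then ca + 1 else ca)) := by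
          simp [hc]; omega
        have hstep : reduceStack (c :: rest) (List.replicate (n + 1) 'A')
            = reduceStack rest (List.replicate n 'A') := by
          simp [reduceStack, List.replicate, hc]
        rw [hstep]
        simp only [checkLoopA, if_neg hno]
        exact ih n _ _ (by simp [hc]; omega)

-- ===== VERDICT (by name: the statement is the Claim_ definition above) =====
theorem check_good_str_spec : Claim_equal_check_good_str := by
  intro inp_str _ _
  unfold Spec_check_good_str check_good_str check_good_str_alt
  rw [checkLoopA_eq_reduceStack inp_str.toList 0 0 0 rfl]
  simp only [List.replicate]
  split_ifs with h <;> simp
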